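-- pv_equiv track=rewrite | github.com/21centuryweather/hk25-AusCyclones | utils/plotting.py | sanitize_lonlist
-- ===== SOURCE A (Python) =====
-- def sanitize_lonlist(lons):
--     new_list = []
--     oldval = 0
--     threshold = 30  # degrees to detect jumps
--     for ix, ea in enumerate(lons):
--         diff = oldval - ea
--         if ix > 0 and diff > threshold:
--             ea = ea + 360  # fix backward jump when crossing the dateline
--         elif ix > 0 and diff < -threshold:
--             ea = ea - 360  # fix forward jump when crossing the dateline
--         oldval = ea
--         new_list.append(ea)
--     return new_list
-- ===== SOURCE B (Python) =====
-- def sanitize_lonlist(lons):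
--     # Stage 1: over consecutive RAW pairs, compute a correction code k in {-1,0,1}
--     # for each element after the first.  This uses the invariant that the adjusted
--     # value of element i is always lons[i] + 360*k_i, so the jump test against the
--     # previously adjusted value is (prev_raw + 360*k_prev) - cur_raw.
--     ks = []
--     k = 0
--     for prev, cur in zip(lons, lons[1:]):
--         d = prev + 360 * k - cur
--         k = 1 if d > 30 else (-1 if d < -30 else 0)
--         ks.append(k)
--     # Stage 2: apply the codes (the first element gets code 0).
--     return [ea + 360 * k for ea, k in zip(lons, [0] + ks)]
-- ===== Notes on version B (the rewrite author's own statement) =====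
-- stated objective: alternative
-- what changed: B separates detection from correction: a first pass over consecutive raw pairs computes a per-element correction code in {-1,0,1} (exploiting the invariant that every adjusted value is lon + 360*k), and a second pass applies the codes; A instead threads the adjusted longitude itself through one loop that builds the output directly.
import Mathlib
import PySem

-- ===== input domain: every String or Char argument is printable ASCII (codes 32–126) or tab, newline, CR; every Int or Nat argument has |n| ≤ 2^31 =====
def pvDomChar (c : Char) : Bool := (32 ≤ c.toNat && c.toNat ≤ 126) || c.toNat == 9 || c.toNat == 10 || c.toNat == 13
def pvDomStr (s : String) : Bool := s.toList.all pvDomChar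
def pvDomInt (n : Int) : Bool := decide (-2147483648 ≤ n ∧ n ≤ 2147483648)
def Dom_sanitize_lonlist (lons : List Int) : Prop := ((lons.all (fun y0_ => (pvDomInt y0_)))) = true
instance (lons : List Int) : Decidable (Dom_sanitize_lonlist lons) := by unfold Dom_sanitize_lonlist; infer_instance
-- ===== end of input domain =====

-- B replaces A's single loop threading adjusted longitudes with a two-stage algorithm:
-- a pass over consecutive raw pairs computing correction codes in {-1,0,1}, then a pass applying them (alternative; same cost).

-- ===== PORT A =====
-- A's loop over enumerate(lons) with state (new_list, oldval).
def sanitize_lonlist (lons : List Int) : List Int :=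
  ((PySem.List.enumerate lons 0).foldl
    (fun (st : List Int × Int) p =>
      let ix := p.1
      let ea := p.2
      let diff := st.2 - ea
      let ea :=
        if ix > 0 ∧ diff > 30 then ea + 360
        else if ix > 0 ∧ diff < -30 then ea - 360
        else ea
      (st.1 ++ [ea], ea))
    ([], 0)).1

-- ===== PORT B =====
-- Stage 1: loop over zip(lons, lons[1:]) (lons[1:] = lons.drop 1, exact for a list) with state (ks, k).
def pvCodes (lons : List Int) : List Int :=
  ((lons.zip (lons.drop 1)).foldl
    (fun (st : List Int × Int) p =>
      let d := p.1 + 360 * st.2 - p.2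
      let k := if d > 30 then (1 : Int) else if d < -30 then -1 else 0
      (st.1 ++ [k], k))
    ([], 0)).1

-- Stage 2: apply the codes; the first element gets code 0.
def sanitize_lonlist_alt (lons : List Int) : List Int :=
  (lons.zip (0 :: pvCodes lons)).map (fun p => p.1 + 360 * p.2)

-- ===== PRECONDITION & SPEC =====
def Spec_sanitize_lonlist (lons : List Int) (out : List Int) : Prop := out = sanitize_lonlist_alt lons
instance (lons : List Int) (out : List Int) : Decidable (Spec_sanitize_lonlist lons out) := by unfold Spec_sanitize_lonlist; infer_instance

-- ===== CLAIM (what is proved, stated in full; the proofs are below) =====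
def Claim_equal_sanitize_lonlist : Prop := ∀ (lons : List Int), Dom_sanitize_lonlist lons → Spec_sanitize_lonlist lons (sanitize_lonlist lons)

-- ===== LEMMAS AND PROOFS =====

-- Reference form of the code sequence: codes for the tail xs, given previous raw value p and previous code k.
def pvDFrom (p k : Int) : List Int → List Int
  | [] => []
  | x :: xs =>
    let d := p + 360 * k - x
    let k' := if d > 30 then (1 : Int) else if d < -30 then -1 else 0
    k' :: pvDFrom x k' xs

-- B's stage-1 fold computes pvDFrom.
theorem pvCodes_eq_from (xs : List Int) (p k : Int) (acc : List Int) :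
    (((p :: xs).zip xs).foldl
      (fun (st : List Int × Int) q =>
        (st.1 ++ [if q.1 + 360 * st.2 - q.2 > 30 then (1 : Int)
                  else if q.1 + 360 * st.2 - q.2 < -30 then -1 else 0],
         if q.1 + 360 * st.2 - q.2 > 30 then (1 : Int)
         else if q.1 + 360 * st.2 - q.2 < -30 then -1 else 0))
      (acc, k)).1 = acc ++ pvDFrom p k xs := by
  induction xs generalizing p k acc with
  | nil => simp [pvDFrom]
  | cons y ys ih =>
    simp only [List.zip_cons_cons, List.foldl_cons, pvDFrom]
    rw [ih]
    simp

-- A's tail loop (indices ≥ 1) produces exactly the raw values plus 360 times the pvDFrom codes.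
theorem pvA_loop_eq (xs : List Int) (n : Int) (hn : 1 ≤ n) (p k : Int) (acc : List Int) :
    ((PySem.List.enumerate xs n).foldl
      (fun (st : List Int × Int) q =>
        (st.1 ++ [if q.1 > 0 ∧ st.2 - q.2 > 30 then q.2 + 360
                  else if q.1 > 0 ∧ st.2 - q.2 < -30 then q.2 - 360 else q.2],
         if q.1 > 0 ∧ st.2 - q.2 > 30 then q.2 + 360
         else if q.1 > 0 ∧ st.2 - q.2 < -30 then q.2 - 360 else q.2))
      (acc, p + 360 * k)).1
    = acc ++ (xs.zip (pvDFrom p k xs)).map (fun q => q.1 + 360 * q.2) := by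
  induction xs generalizing n p k acc with
  | nil => simp [PySem.List.enumerate_nil, pvDFrom]
  | cons x xs' ih =>
    rw [PySem.List.enumerate_cons]
    simp only [List.foldl_cons, pvDFrom, List.zip_cons_cons, List.map_cons]
    have hpos : n > 0 := by omega
    have hk' :
        (if n > 0 ∧ (p + 360 * k) - x > 30 then x + 360
         else if n > 0 ∧ (p + 360 * k) - x < -30 then x - 360 else x)
        = x + 360 * (if p + 360 * k - x > 30 then (1 : Int)
                     else if p + 360 * k - x < -30 then -1 else 0) := by
      simp only [hpos, true_and]
      split_ifs <;> ring
    rw [hk']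
    rw [ih (n + 1) (by omega) x _ _]
    simp

-- ===== VERDICT (by name: the statement is the Claim_ definition above) =====
theorem sanitize_lonlist_spec : Claim_equal_sanitize_lonlist := by
  intro lons _
  unfold Spec_sanitize_lonlist sanitize_lonlist sanitize_lonlist_alt pvCodes
  cases lons with
  | nil => simp [PySem.List.enumerate_nil]
  | cons x xs =>
    rw [PySem.List.enumerate_cons]
    simp only [List.foldl_cons, List.drop_succ_cons, List.drop_zero]
    have h0 : (if (0:Int) > 0 ∧ (0:Int) - x > 30 then x + 360
               else if (0:Int) > 0 ∧ (0:Int) - x < -30 then x - 360 else x) = x := by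
      simp
    simp only [h0, List.nil_append]
    rw [pvCodes_eq_from xs x 0 []]
    have := pvA_loop_eq xs (0 + 1) (by omega) x 0 [x]
    simp only [mul_zero, add_zero] at this
    rw [this]
    simp [List.zip_cons_cons]
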